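-- pv_equiv track=rewrite | github.com/arjunrajlaboratory/ProbeDesign | DesignServer/probe_design.py | mask_oligos_with_runs
-- ===== SOURCE A (Python) =====
-- def mask_runs(inseq,thechar,runlength,mismatches):
--     outseq = [0]*len(inseq)
--     for i in range(len(inseq)-runlength+1):
--         count = 0
--         for j in range(i,i+runlength):
--             if inseq[j] == thechar:
--                 count += 1
--         if count >= runlength-mismatches:
--             outseq[i:i+runlength] = [1]*runlength;
--
--     return outseq
--
-- def mask_oligos_with_runs(inseq,thechar,runlength,mismatches,oligolen):
--     outseq = [0]*len(inseq)
--
--     for i in range(len(inseq)-oligolen+1):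
--         tmp = inseq[i:i+oligolen]
--         rn = mask_runs(tmp,thechar,runlength,mismatches)
--         if sum(rn)>0:
--             outseq[i] = 1
--
--     return outseq
-- ===== SOURCE B (Python) =====
-- def mask_oligos_with_runs(inseq, thechar, runlength, mismatches, oligolen):
--     n = len(inseq)
--     out = [0] * n
--     if runlength <= 0 or oligolen <= 0 or runlength > oligolen:
--         return out
--     # prefix counts of positions matching thechar
--     P = [0] * (n + 1)
--     for k in range(n):
--         P[k + 1] = P[k] + (1 if inseq[k] == thechar else 0)
--     # prefix counts of qualifying run starts
--     m = n - runlength + 1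
--     QS = [0] * (max(m, 0) + 1)
--     for p in range(max(m, 0)):
--         QS[p + 1] = QS[p] + (1 if P[p + runlength] - P[p] >= runlength - mismatches else 0)
--     # sliding window: oligo start i qualifies iff some qualifying run start lies in [i, i + w)
--     w = oligolen - runlength + 1
--     for i in range(n - oligolen + 1):
--         if QS[i + w] - QS[i] > 0:
--             out[i] = 1
--     return out
-- ===== Notes on version B (the rewrite author's own statement) =====
-- stated objective: faster
-- what changed: Replaces the per-oligo rescan (slice every window and re-run mask_runs over all run starts inside it) with one pass of prefix sums: prefix counts of character matches, a prefix count of qualifying run starts, and an O(1) range-existence query per oligo start.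
-- intended difference: For oligolen < 0 Python's slice inseq[i:i+oligolen] wraps around, so A marks the first few oligo starts whenever the wrapped window still contains a qualifying run; B returns all zeros there, the intended value since no oligo of negative length fits anywhere. — e.g. on mask_oligos_with_runs("AAA", "A", 1, 0, -2): A returns [1, 1, 0], B returns [0, 0, 0]
import Mathlib
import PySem

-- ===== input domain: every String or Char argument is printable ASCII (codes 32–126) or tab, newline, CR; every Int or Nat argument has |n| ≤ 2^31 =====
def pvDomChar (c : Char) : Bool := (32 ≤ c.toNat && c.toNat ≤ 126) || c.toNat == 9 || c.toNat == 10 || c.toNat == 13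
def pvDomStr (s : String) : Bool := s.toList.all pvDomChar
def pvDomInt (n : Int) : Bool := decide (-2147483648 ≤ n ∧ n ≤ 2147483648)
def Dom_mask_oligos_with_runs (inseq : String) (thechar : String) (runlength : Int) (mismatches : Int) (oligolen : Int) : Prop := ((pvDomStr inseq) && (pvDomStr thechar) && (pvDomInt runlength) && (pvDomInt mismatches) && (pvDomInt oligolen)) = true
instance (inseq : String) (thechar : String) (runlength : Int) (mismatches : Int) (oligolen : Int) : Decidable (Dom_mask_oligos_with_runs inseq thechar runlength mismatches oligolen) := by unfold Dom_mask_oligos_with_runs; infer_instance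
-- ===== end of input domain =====

-- B replaces A's per-oligo rescan by prefix-sum counting (faster, one pass); for oligolen < 0 A's wrapped
-- slice marks spurious starts while B returns all zeros (stated as D_ below).


-- ===== PORT A =====
-- Python's `inseq[j] == thechar` (a 1-char string compared with thechar); none = IndexError, unreachable
-- for the j the loops produce (the inner loop only runs with j in range)
def pvChEqAt (cs : List Char) (j : Int) (tc : String) : Bool :=
  match PySem.List.pyGet? cs j with
  | some c => [c] == tc.toList
  | none => false

-- Python slice assignment `xs[a:b] = v` (step 1, any a, b and any length of v): exact — Python replaces
-- the elements from clamp(a) to max(clamp(a), clamp(b)) by v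
def pvSliceAssign (xs : List Int) (a b : Int) (v : List Int) : List Int :=
  let a' := PySem.List.clampIdx xs.length a
  let b' := max a' (PySem.List.clampIdx xs.length b)
  xs.take a' ++ v ++ xs.drop b'

-- mask_runs, transliterated
def pvMaskRuns (inseq : List Char) (thechar : String) (runlength : Int) (mismatches : Int) : List Int :=
  (PySem.List.pyRange 0 ((inseq.length : Int) - runlength + 1) 1).foldl
    (fun outseq i =>
      let count : Int := (PySem.List.pyRange i (i + runlength) 1).foldl
        (fun count j => if pvChEqAt inseq j thechar then count + 1 else count) 0
      if runlength - mismatches ≤ count then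
        pvSliceAssign outseq i (i + runlength) (List.replicate runlength.toNat 1)
      else outseq)
    (List.replicate inseq.length (0 : Int))

def mask_oligos_with_runs (inseq : String) (thechar : String) (runlength : Int) (mismatches : Int) (oligolen : Int) : List Int :=
  let cs := inseq.toList
  (PySem.List.pyRange 0 ((cs.length : Int) - oligolen + 1) 1).foldl
    (fun outseq i =>
      let tmp := PySem.List.slice cs (some i) (some (i + oligolen))
      let rn := pvMaskRuns tmp thechar runlength mismatches
      -- outseq[i] = 1: i is nonnegative and < len(outseq) whenever this branch fires
      if 0 < rn.sum then outseq.set i.toNat 1 else outseq)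
    (List.replicate cs.length (0 : Int))

-- ===== PORT B =====
def mask_oligos_with_runs_alt (inseq : String) (thechar : String) (runlength : Int) (mismatches : Int) (oligolen : Int) : List Int :=
  let cs := inseq.toList
  let n : Int := cs.length
  let out := List.replicate cs.length (0 : Int)
  if runlength ≤ 0 || oligolen ≤ 0 || oligolen < runlength then out
  else
    -- P[k] = number of positions < k matching thechar (indexed reads are always in range; default unreachable)
    let P : List Int := (PySem.List.pyRange 0 n 1).foldl
      (fun P k => P ++ [PySem.List.pyGetD P k 0 + (if pvChEqAt cs k thechar then 1 else 0)]) [0]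
    let m : Int := n - runlength + 1
    -- QS[k] = number of qualifying run starts < k
    let QS : List Int := (PySem.List.pyRange 0 (max m 0) 1).foldl
      (fun QS p => QS ++ [PySem.List.pyGetD QS p 0 +
        (if runlength - mismatches ≤
            PySem.List.pyGetD P (p + runlength) 0 - PySem.List.pyGetD P p 0 then 1 else 0)]) [0]
    let w : Int := oligolen - runlength + 1
    (PySem.List.pyRange 0 (n - oligolen + 1) 1).foldl
      (fun out i =>
        if 0 < PySem.List.pyGetD QS (i + w) 0 - PySem.List.pyGetD QS i 0 then out.set i.toNat 1 else out)
      out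

-- ===== PRECONDITION & SPEC =====
-- For oligolen < 0 Python's slice inseq[i:i+oligolen] wraps around, so A marks the first few oligo starts
-- whenever the wrapped window still contains a qualifying run; B returns all zeros there, the intended
-- value since no oligo of negative length fits anywhere.
def D_mask_oligos_with_runs (inseq : String) (thechar : String) (runlength : Int) (mismatches : Int) (oligolen : Int) : Prop :=
  oligolen < 0 ∧ 1 ≤ runlength ∧ runlength ≤ (inseq.toList.length : Int) + oligolen ∧
  ∃ p < inseq.toList.length - runlength.toNat,
    runlength - mismatches ≤
      (((inseq.toList.drop p).take runlength.toNat).countP (fun c => [c] == thechar.toList) : Int)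

instance (inseq : String) (thechar : String) (runlength : Int) (mismatches : Int) (oligolen : Int) : Decidable (D_mask_oligos_with_runs inseq thechar runlength mismatches oligolen) := by
  unfold D_mask_oligos_with_runs; infer_instance

def Spec_mask_oligos_with_runs (inseq : String) (thechar : String) (runlength : Int) (mismatches : Int) (oligolen : Int) (out : List Int) : Prop := ¬ D_mask_oligos_with_runs inseq thechar runlength mismatches oligolen → out = mask_oligos_with_runs_alt inseq thechar runlength mismatches oligolen
instance (inseq : String) (thechar : String) (runlength : Int) (mismatches : Int) (oligolen : Int) (out : List Int) : Decidable (Spec_mask_oligos_with_runs inseq thechar runlength mismatches oligolen out) := by unfold Spec_mask_oligos_with_runs; infer_instance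

def pvDiffWitness_mask_oligos_with_runs : String × String × Int × Int × Int := ("AAA", "A", 1, 0, -2)
def pvDiffWitnessOut_mask_oligos_with_runs : (List Int) × (List Int) := ([1, 1, 0], [0, 0, 0])

-- ===== CLAIM (what is proved, stated in full; the proofs are below) =====
def Claim_unchanged_mask_oligos_with_runs : Prop := ∀ (inseq : String) (thechar : String) (runlength : Int) (mismatches : Int) (oligolen : Int), Dom_mask_oligos_with_runs inseq thechar runlength mismatches oligolen → Spec_mask_oligos_with_runs inseq thechar runlength mismatches oligolen (mask_oligos_with_runs inseq thechar runlength mismatches oligolen)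
def Claim_changed_mask_oligos_with_runs : Prop := Dom_mask_oligos_with_runs (pvDiffWitness_mask_oligos_with_runs.1) (pvDiffWitness_mask_oligos_with_runs.2.1) (pvDiffWitness_mask_oligos_with_runs.2.2.1) (pvDiffWitness_mask_oligos_with_runs.2.2.2.1) (pvDiffWitness_mask_oligos_with_runs.2.2.2.2) ∧ D_mask_oligos_with_runs (pvDiffWitness_mask_oligos_with_runs.1) (pvDiffWitness_mask_oligos_with_runs.2.1) (pvDiffWitness_mask_oligos_with_runs.2.2.1) (pvDiffWitness_mask_oligos_with_runs.2.2.2.1) (pvDiffWitness_mask_oligos_with_runs.2.2.2.2) ∧ mask_oligos_with_runs (pvDiffWitness_mask_oligos_with_runs.1) (pvDiffWitness_mask_oligos_with_runs.2.1) (pvDiffWitness_mask_oligos_with_runs.2.2.1) (pvDiffWitness_mask_oligos_with_runs.2.2.2.1) (pvDiffWitness_mask_oligos_with_runs.2.2.2.2) = pvDiffWitnessOut_mask_oligos_with_runs.1 ∧ mask_oligos_with_runs_alt (pvDiffWitness_mask_oligos_with_runs.1) (pvDiffWitness_mask_oligos_with_runs.2.1) (pvDiffWitness_mask_oligos_with_runs.2.2.1)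 (pvDiffWitness_mask_oligos_with_runs.2.2.2.1) (pvDiffWitness_mask_oligos_with_runs.2.2.2.2) = pvDiffWitnessOut_mask_oligos_with_runs.2 ∧ pvDiffWitnessOut_mask_oligos_with_runs.1 ≠ pvDiffWitnessOut_mask_oligos_with_runs.2
def Claim_exact_mask_oligos_with_runs : Prop := ∀ (inseq : String) (thechar : String) (runlength : Int) (mismatches : Int) (oligolen : Int), Dom_mask_oligos_with_runs inseq thechar runlength mismatches oligolen → D_mask_oligos_with_runs inseq thechar runlength mismatches oligolen → mask_oligos_with_runs inseq thechar runlength mismatches oligolen ≠ mask_oligos_with_runs_alt inseq thechar runlength mismatches oligolen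


-- ===== LEMMAS AND PROOFS =====

-- ---- generic small facts ----

theorem pv_foldl_id {α β : Type} (l : List α) (z : β) : l.foldl (fun o _ => o) z = z := by
  induction l generalizing z with
  | nil => rfl
  | cons a l ih => simpa using ih z

theorem pv_clampIdx_cases (n : Nat) (x : Int) :
    (0 ≤ x ∧ x ≤ n ∧ ((PySem.List.clampIdx n x : Nat) : Int) = x) ∨
    (0 ≤ x ∧ (n : Int) < x ∧ ((PySem.List.clampIdx n x : Nat) : Int) = n) ∨
    (x < 0 ∧ (n : Int) + x < 0 ∧ ((PySem.List.clampIdx n x : Nat) : Int) = 0) ∨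
    (x < 0 ∧ 0 ≤ (n : Int) + x ∧ ((PySem.List.clampIdx n x : Nat) : Int) = (n : Int) + x) := by
  unfold PySem.List.clampIdx
  by_cases h : x < 0
  · rw [if_pos h]
    by_cases h2 : (n : Int) + x < 0
    · rw [if_pos h2]; right; right; left; exact ⟨h, h2, by omega⟩
    · rw [if_neg h2]; right; right; right; exact ⟨h, by omega, by omega⟩
  · rw [if_neg h]
    by_cases h2 : x ≤ (n : Int)
    · left; exact ⟨by omega, h2, by omega⟩
    · right; left; exact ⟨by omega, by omega, by omega⟩

theorem pv_pyRange_zero_toNat (b : Int) :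
    PySem.List.pyRange 0 b 1 = PySem.List.pyRange 0 ((b.toNat : Nat) : Int) 1 := by
  rcases le_or_gt b 0 with h | h
  · rw [PySem.List.pyRange_one_eq_nil h, PySem.List.pyRange_one_eq_nil (by omega)]
  · congr 1; omega

theorem pv_window (cs : List Char) (i m j r : Nat) (hjr : j + r ≤ m) :
    (((cs.drop i).take m).drop j).take r = (cs.drop (i + j)).take r := by
  rw [List.drop_take, List.take_take, List.drop_drop]
  congr 1
  omega

-- ---- the character/window predicates both programs decide ----

def pvQualB (cs : List Char) (tc : String) (rl mm : Int) (p : Nat) : Bool :=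
  decide (rl - mm ≤ (((cs.drop p).take rl.toNat).countP (fun c => [c] == tc.toList) : Int))

theorem pv_countP_pyRange (cs : List Char) (tc : String) :
    ∀ (m i : Nat), i + m ≤ cs.length →
      (PySem.List.pyRange (i : Int) ((i : Int) + (m : Int)) 1).countP (fun j => pvChEqAt cs j tc)
        = ((cs.drop i).take m).countP (fun c => [c] == tc.toList) := by
  intro m
  induction m with
  | zero =>
    intro i h
    rw [PySem.List.pyRange_one_eq_nil (by omega)]
    simp
  | succ m ih =>
    intro i h
    rw [PySem.List.pyRange_one_cons (by omega)]
    have hi : i < cs.length := by omega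
    rw [List.drop_eq_getElem_cons hi, List.take_succ_cons, List.countP_cons, List.countP_cons]
    have hstep : ((i : Int) + 1) = ((i + 1 : Nat) : Int) := by push_cast; ring
    have hend : ((i : Int) + ((m + 1 : Nat) : Int)) = (((i + 1 : Nat)) : Int) + ((m : Nat) : Int) := by
      push_cast; ring
    rw [hstep, hend, ih (i + 1) (by omega)]
    have hhead : pvChEqAt cs (i : Int) tc = ([cs[i]] == tc.toList) := by
      unfold pvChEqAt
      rw [PySem.List.pyGet?_natCast, List.getElem?_eq_getElem hi]
    rw [hhead]

theorem pv_count_fold (cs : List Char) (tc : String) (i m : Nat) (h : i + m ≤ cs.length) :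
    (PySem.List.pyRange (i : Int) ((i : Int) + (m : Int)) 1).foldl
        (fun c j => if pvChEqAt cs j tc then c + 1 else c) (0 : Int)
      = (((cs.drop i).take m).countP (fun c => [c] == tc.toList) : Int) := by
  rw [PySem.List.foldl_count_if, pv_countP_pyRange cs tc m i h, zero_add]

-- ---- A side: mask_runs ----

def pvCnt (inseq : List Char) (tc : String) (rl : Int) (i : Int) : Int :=
  (PySem.List.pyRange i (i + rl) 1).foldl
    (fun count j => if pvChEqAt inseq j tc then count + 1 else count) 0

def pvStep (inseq : List Char) (tc : String) (rl mm : Int) (outseq : List Int) (i : Int) : List Int :=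
  if rl - mm ≤ pvCnt inseq tc rl i then
    pvSliceAssign outseq i (i + rl) (List.replicate rl.toNat 1)
  else outseq

theorem pvMaskRuns_eq (inseq : List Char) (tc : String) (rl mm : Int) :
    pvMaskRuns inseq tc rl mm
      = (PySem.List.pyRange 0 ((inseq.length : Int) - rl + 1) 1).foldl (pvStep inseq tc rl mm)
          (List.replicate inseq.length 0) := rfl

theorem pv_step_apply (inseq : List Char) (tc : String) (rl mm : Int) (acc : List Int) (i : Int) :
    pvStep inseq tc rl mm acc i
      = if rl - mm ≤ pvCnt inseq tc rl i then
          pvSliceAssign acc i (i + rl) (List.replicate rl.toNat 1)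
        else acc := rfl

theorem pv_cnt_eq (cs : List Char) (tc : String) (rl : Int) (h1 : 0 ≤ rl) (i : Nat)
    (h : (i : Int) + rl ≤ cs.length) :
    pvCnt cs tc rl (i : Int)
      = (((cs.drop i).take rl.toNat).countP (fun c => [c] == tc.toList) : Int) := by
  unfold pvCnt
  have hb : (i : Int) + rl = (i : Int) + ((rl.toNat : Nat) : Int) := by omega
  rw [hb, pv_count_fold cs tc i rl.toNat (by omega)]

theorem pv_cnt_iff_qual (cs : List Char) (tc : String) (rl mm : Int) (h1 : 0 ≤ rl) (i : Nat)
    (h : (i : Int) + rl ≤ cs.length) :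
    (rl - mm ≤ pvCnt cs tc rl (i : Int)) ↔ pvQualB cs tc rl mm i = true := by
  rw [pv_cnt_eq cs tc rl h1 i h]
  unfold pvQualB
  simp

theorem pv_sliceAssign_nonneg (xs : List Int) (a b : Int) (v : List Int)
    (hx : ∀ x ∈ xs, 0 ≤ x) (hv : ∀ x ∈ v, 0 ≤ x) : ∀ x ∈ pvSliceAssign xs a b v, 0 ≤ x := by
  intro x hmem
  unfold pvSliceAssign at hmem
  simp only [List.mem_append] at hmem
  rcases hmem with (hm | hm) | hm
  · exact hx x (List.mem_of_mem_take hm)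
  · exact hv x hm
  · exact hx x (List.mem_of_mem_drop hm)

theorem pv_sliceAssign_sum_pos (xs : List Int) (a b : Int) (v : List Int)
    (hx : ∀ x ∈ xs, 0 ≤ x) (hv : 0 < v.sum) : 0 < (pvSliceAssign xs a b v).sum := by
  unfold pvSliceAssign
  rw [List.sum_append, List.sum_append]
  have h1 : 0 ≤ (xs.take (PySem.List.clampIdx xs.length a)).sum :=
    List.sum_nonneg (fun x h => hx x (List.mem_of_mem_take h))
  have h2 : 0 ≤ (xs.drop (max (PySem.List.clampIdx xs.length a)
      (PySem.List.clampIdx xs.length b))).sum :=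
    List.sum_nonneg (fun x h => hx x (List.mem_of_mem_drop h))
  omega

theorem pv_fold_step_nonneg (inseq : List Char) (tc : String) (rl mm : Int) :
    ∀ (l : List Int) (acc : List Int), (∀ x ∈ acc, 0 ≤ x) →
      ∀ x ∈ l.foldl (pvStep inseq tc rl mm) acc, 0 ≤ x := by
  intro l
  induction l with
  | nil => intro acc hacc; simpa using hacc
  | cons a l ih =>
    intro acc hacc
    rw [List.foldl_cons]
    apply ih
    rw [pv_step_apply]
    split
    · exact pv_sliceAssign_nonneg _ _ _ _ hacc
        (fun x hx => by rw [List.eq_of_mem_replicate hx]; norm_num)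
    · exact hacc

theorem pv_sum_fold (inseq : List Char) (tc : String) (rl mm : Int) (h1 : 1 ≤ rl) :
    ∀ (N : Nat) (acc : List Int), (∀ x ∈ acc, 0 ≤ x) →
      (0 < ((PySem.List.pyRange 0 (N : Int) 1).foldl (pvStep inseq tc rl mm) acc).sum ↔
        0 < acc.sum ∨ ∃ i : Nat, i < N ∧ rl - mm ≤ pvCnt inseq tc rl i) := by
  intro N
  induction N with
  | zero =>
    intro acc hacc
    rw [show ((0 : Nat) : Int) = 0 from rfl, PySem.List.pyRange_one_eq_nil le_rfl]
    simp
  | succ N ih =>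
    intro acc hacc
    have hcast : ((N + 1 : Nat) : Int) = (N : Int) + 1 := by push_cast; ring
    rw [hcast, PySem.List.pyRange_one_succ_right (by positivity), List.foldl_append]
    simp only [List.foldl_cons, List.foldl_nil]
    have hnn := pv_fold_step_nonneg inseq tc rl mm (PySem.List.pyRange 0 (N : Int) 1) acc hacc
    by_cases hcond : rl - mm ≤ pvCnt inseq tc rl (N : Int)
    · constructor
      · intro _
        exact Or.inr ⟨N, Nat.lt_succ_self N, hcond⟩
      · intro _
        rw [pv_step_apply, if_pos hcond]
        apply pv_sliceAssign_sum_pos _ _ _ _ hnn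
        rw [List.sum_replicate, nsmul_eq_mul, mul_one]
        omega
    · rw [pv_step_apply, if_neg hcond, ih acc hacc]
      constructor
      · rintro (h | ⟨i, hi, hq⟩)
        · exact Or.inl h
        · exact Or.inr ⟨i, Nat.lt_succ_of_lt hi, hq⟩
      · rintro (h | ⟨i, hi, hq⟩)
        · exact Or.inl h
        · rcases Nat.lt_succ_iff_lt_or_eq.mp hi with hi2 | rfl
          · exact Or.inr ⟨i, hi2, hq⟩
          · exact absurd hq hcond

theorem pv_maskRuns_zero_elems (tmp : List Char) (tc : String) (rl mm : Int) (h : rl ≤ 0) :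
    ∀ x ∈ pvMaskRuns tmp tc rl mm, x = 0 := by
  rw [pvMaskRuns_eq]
  have main : ∀ (l : List Int) (acc : List Int), (∀ x ∈ acc, x = 0) →
      ∀ x ∈ l.foldl (pvStep tmp tc rl mm) acc, x = 0 := by
    intro l
    induction l with
    | nil => intro acc hacc; simpa using hacc
    | cons a l ih =>
      intro acc hacc
      rw [List.foldl_cons]
      apply ih
      rw [pv_step_apply]
      split
      · intro x hx
        rw [show rl.toNat = 0 by omega] at hx
        unfold pvSliceAssign at hx
        simp only [List.replicate_zero, List.append_nil, List.nil_append, List.mem_append] at hx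
        rcases hx with hx | hx
        · exact hacc x (List.mem_of_mem_take hx)
        · exact hacc x (List.mem_of_mem_drop hx)
      · exact hacc
  exact main _ _ (fun x hx => List.eq_of_mem_replicate hx)

theorem pv_maskRuns_sum_pos (tmp : List Char) (tc : String) (rl mm : Int) (h1 : 1 ≤ rl) :
    0 < (pvMaskRuns tmp tc rl mm).sum ↔
      ∃ j : Nat, (j : Int) + rl ≤ tmp.length ∧ pvQualB tmp tc rl mm j = true := by
  rw [pvMaskRuns_eq]
  rcases le_or_gt ((tmp.length : Int) - rl + 1) 0 with hb | hb
  · rw [PySem.List.pyRange_one_eq_nil hb]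
    simp only [List.foldl_nil]
    constructor
    · intro h
      rw [List.sum_replicate, smul_zero] at h
      exact absurd h (lt_irrefl 0)
    · rintro ⟨j, hj, _⟩
      omega
  · have hN : (tmp.length : Int) - rl + 1 = ((((tmp.length : Int) - rl + 1).toNat : Nat) : Int) := by
      omega
    rw [hN, pv_sum_fold tmp tc rl mm h1 _ _
      (fun x hx => by rw [List.eq_of_mem_replicate hx])]
    rw [List.sum_replicate, smul_zero]
    simp only [lt_irrefl, false_or]
    constructor
    · rintro ⟨i, hi, hq⟩
      refine ⟨i, by omega, ?_⟩
      exact (pv_cnt_iff_qual tmp tc rl mm (by omega) i (by omega)).mp hq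
    · rintro ⟨j, hj, hq⟩
      refine ⟨j, by omega, ?_⟩
      exact (pv_cnt_iff_qual tmp tc rl mm (by omega) j (by omega)).mpr hq

-- ---- the 0/1 marking loop both programs end with ----

def pvSetStep (cond : Int → Bool) (o : List Int) (i : Int) : List Int :=
  if cond i then o.set i.toNat 1 else o

theorem pv_setfold_length (cond : Int → Bool) (l : List Int) :
    ∀ zs : List Int, (l.foldl (pvSetStep cond) zs).length = zs.length := by
  induction l with
  | nil => intro zs; rfl
  | cons a l ih =>
    intro zs
    rw [List.foldl_cons, ih]
    unfold pvSetStep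
    split <;> simp

theorem pv_setstep_apply (cond : Int → Bool) (o : List Int) (i : Int) :
    pvSetStep cond o i = if cond i then o.set i.toNat 1 else o := rfl

theorem pv_setfold_getElem? (cond : Int → Bool) :
    ∀ (N : Nat) (zs : List Int) (k : Nat),
      ((PySem.List.pyRange 0 (N : Int) 1).foldl (pvSetStep cond) zs)[k]?
        = if k < N ∧ cond k then (if k < zs.length then some 1 else none) else zs[k]? := by
  intro N
  induction N with
  | zero =>
    intro zs k
    rw [show ((0 : Nat) : Int) = 0 from rfl, PySem.List.pyRange_one_eq_nil le_rfl]
    simp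
  | succ N ih =>
    intro zs k
    have hcast : ((N + 1 : Nat) : Int) = (N : Int) + 1 := by push_cast; ring
    rw [hcast, PySem.List.pyRange_one_succ_right (by positivity), List.foldl_append]
    simp only [List.foldl_cons, List.foldl_nil]
    rw [pv_setstep_apply]
    have hlen := pv_setfold_length cond (PySem.List.pyRange 0 (N : Int) 1) zs
    by_cases hc : cond (N : Int) = true
    · rw [if_pos hc, List.getElem?_set]
      simp only [Int.toNat_natCast, hlen]
      by_cases hk : N = k
      · subst hk
        rw [if_pos rfl,
          if_pos (show N < N + 1 ∧ cond (N : Int) = true from ⟨Nat.lt_succ_self N, hc⟩)]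
      · rw [if_neg hk, ih]
        by_cases h3 : k < N ∧ cond (k : Int) = true
        · rw [if_pos h3,
            if_pos (show k < N + 1 ∧ cond (k : Int) = true from ⟨by omega, h3.2⟩)]
        · rw [if_neg h3, if_neg (by rintro ⟨h4, h5⟩; exact h3 ⟨by omega, h5⟩)]
    · rw [if_neg hc, ih]
      by_cases h3 : k < N ∧ cond (k : Int) = true
      · rw [if_pos h3,
          if_pos (show k < N + 1 ∧ cond (k : Int) = true from ⟨by omega, h3.2⟩)]
      · rw [if_neg h3, if_neg ?_]
        rintro ⟨h4, h5⟩
        rcases Nat.lt_succ_iff_lt_or_eq.mp h4 with h6 | rfl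
        · exact h3 ⟨h6, h5⟩
        · exact hc h5

def pvCondA (cs : List Char) (tc : String) (rl mm ol : Int) (i : Int) : Bool :=
  decide (0 < (pvMaskRuns (PySem.List.slice cs (some i) (some (i + ol))) tc rl mm).sum)

theorem pv_A_eq (inseq tc : String) (rl mm ol : Int) :
    mask_oligos_with_runs inseq tc rl mm ol
      = (PySem.List.pyRange 0 ((inseq.toList.length : Int) - ol + 1) 1).foldl
          (pvSetStep (pvCondA inseq.toList tc rl mm ol)) (List.replicate inseq.toList.length 0) := by
  unfold mask_oligos_with_runs
  apply PySem.List.foldl_congr_mem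
  intro acc x _
  dsimp only
  unfold pvSetStep pvCondA
  by_cases h : 0 < (pvMaskRuns (PySem.List.slice inseq.toList (some x) (some (x + ol))) tc rl mm).sum
  · rw [if_pos h, if_pos (by simpa using h)]
  · rw [if_neg h, if_neg (by simpa using h)]

theorem pv_A_zero (inseq tc : String) (rl mm ol : Int)
    (h : ∀ i ∈ PySem.List.pyRange 0 ((inseq.toList.length : Int) - ol + 1) 1,
      ¬ pvCondA inseq.toList tc rl mm ol i = true) :
    mask_oligos_with_runs inseq tc rl mm ol = List.replicate inseq.toList.length 0 := by
  rw [pv_A_eq]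
  rw [PySem.List.foldl_congr_mem _ _ (fun o _ => o) _
    (fun acc x hx => by unfold pvSetStep; rw [if_neg (h x hx)])]
  exact pv_foldl_id _ _

-- ---- B side: prefix tables ----

def pvP (cs : List Char) (tc : String) : List Int :=
  (PySem.List.pyRange 0 ((cs.length : Int)) 1).foldl
    (fun P k => P ++ [PySem.List.pyGetD P k 0 + (if pvChEqAt cs k tc then 1 else 0)]) [0]

def pvQS (cs : List Char) (tc : String) (rl mm : Int) : List Int :=
  (PySem.List.pyRange 0 (max ((cs.length : Int) - rl + 1) 0) 1).foldl
    (fun QS p => QS ++ [PySem.List.pyGetD QS p 0 +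
      (if rl - mm ≤
          PySem.List.pyGetD (pvP cs tc) (p + rl) 0 - PySem.List.pyGetD (pvP cs tc) p 0
        then 1 else 0)]) [0]

def pvCondB (QS : List Int) (w : Int) (i : Int) : Bool :=
  decide (0 < PySem.List.pyGetD QS (i + w) 0 - PySem.List.pyGetD QS i 0)

theorem pv_B_eq (inseq tc : String) (rl mm ol : Int) (h1 : 1 ≤ rl) (h2 : 1 ≤ ol) (h3 : rl ≤ ol) :
    mask_oligos_with_runs_alt inseq tc rl mm ol
      = (PySem.List.pyRange 0 ((inseq.toList.length : Int) - ol + 1) 1).foldl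
          (pvSetStep (pvCondB (pvQS inseq.toList tc rl mm) (ol - rl + 1)))
          (List.replicate inseq.toList.length 0) := by
  unfold mask_oligos_with_runs_alt
  rw [if_neg (by simp only [Bool.or_eq_true, decide_eq_true_eq]; push_neg; omega)]
  apply PySem.List.foldl_congr_mem
  intro acc x _
  dsimp only
  unfold pvSetStep pvCondB pvQS pvP
  by_cases h : 0 < PySem.List.pyGetD (pvQS inseq.toList tc rl mm) (x + (ol - rl + 1)) 0 -
      PySem.List.pyGetD (pvQS inseq.toList tc rl mm) x 0
  · rw [if_pos (by unfold pvQS pvP at h; exact h), if_pos (by simpa [pvQS, pvP] using h)]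
  · rw [if_neg (by unfold pvQS pvP at h; exact h), if_neg (by simpa [pvQS, pvP] using h)]

theorem pv_B_zero (inseq tc : String) (rl mm ol : Int) (hg : rl ≤ 0 ∨ ol ≤ 0 ∨ ol < rl) :
    mask_oligos_with_runs_alt inseq tc rl mm ol = List.replicate inseq.toList.length 0 := by
  unfold mask_oligos_with_runs_alt
  rw [if_pos (by simp only [Bool.or_eq_true, decide_eq_true_eq]; omega)]

theorem pv_prefix_build (d : Int → Int) :
    ∀ N : Nat,
      (PySem.List.pyRange 0 (N : Int) 1).foldl
          (fun acc k => acc ++ [PySem.List.pyGetD acc k 0 + d k]) [0]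
        = (List.range (N + 1)).map (fun k => ((List.range k).map (fun j : Nat => d (j : Int))).sum) := by
  intro N
  induction N with
  | zero =>
    rw [show ((0 : Nat) : Int) = 0 from rfl, PySem.List.pyRange_one_eq_nil le_rfl]
    simp
  | succ N ih =>
    have hcast : ((N + 1 : Nat) : Int) = (N : Int) + 1 := by push_cast; ring
    rw [hcast, PySem.List.pyRange_one_succ_right (by positivity), List.foldl_append, ih]
    simp only [List.foldl_cons, List.foldl_nil]
    rw [PySem.List.pyGetD_natCast,
      List.getD_eq_getElem _ _ (by simp [Nat.lt_succ_self]),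
      List.getElem_map, List.getElem_range]
    rw [show N + 1 + 1 = (N + 1) + 1 from rfl, List.range_succ (n := N + 1), List.map_append]
    congr 1
    simp [List.range_succ]

theorem pv_P_get (cs : List Char) (tc : String) (k : Nat) (hk : k ≤ cs.length) :
    PySem.List.pyGetD (pvP cs tc) (k : Int) 0
      = ((cs.take k).countP (fun c => [c] == tc.toList) : Int) := by
  unfold pvP
  rw [pv_prefix_build]
  rw [PySem.List.pyGetD_natCast, List.getD_eq_getElem _ _ (by simp; omega),
    List.getElem_map, List.getElem_range]
  rw [PySem.List.sum_map_ite_one_zero]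
  have h := pv_countP_pyRange cs tc k 0 (by omega)
  rw [show ((0 : Nat) : Int) = 0 from rfl, zero_add, List.drop_zero] at h
  rw [PySem.List.pyRange_one, List.countP_map] at h
  simp only [sub_zero, Int.toNat_natCast, Function.comp_def, zero_add] at h
  exact_mod_cast h

theorem pv_QS_get (cs : List Char) (tc : String) (rl mm : Int) (h1 : 1 ≤ rl)
    (hrl : rl ≤ cs.length) (k : Nat) (hk : (k : Int) ≤ (cs.length : Int) - rl + 1) :
    PySem.List.pyGetD (pvQS cs tc rl mm) (k : Int) 0
      = ((List.range k).countP (fun p => pvQualB cs tc rl mm p) : Int) := by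
  unfold pvQS
  have hmax : max ((cs.length : Int) - rl + 1) 0
      = ((((cs.length : Int) - rl + 1).toNat : Nat) : Int) := by omega
  rw [hmax, pv_prefix_build]
  rw [PySem.List.pyGetD_natCast, List.getD_eq_getElem _ _ (by simp; omega),
    List.getElem_map, List.getElem_range]
  rw [List.map_congr_left (g := fun j : Nat => if pvQualB cs tc rl mm j then (1 : Int) else 0) ?_]
  · rw [PySem.List.sum_map_ite_one_zero]
  · intro j hj
    rw [List.mem_range] at hj
    have hj2 : (j : Int) + rl ≤ cs.length := by omega
    have hcast1 : (j : Int) + rl = ((j + rl.toNat : Nat) : Int) := by omega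
    rw [hcast1, pv_P_get cs tc (j + rl.toNat) (by omega), pv_P_get cs tc j (by omega)]
    rw [List.take_add, List.countP_append]
    by_cases hq : rl - mm ≤
        ((((cs.drop j).take rl.toNat).countP (fun c => [c] == tc.toList) : Nat) : Int)
    · rw [if_pos (by push_cast; omega)]
      simp [pvQualB, hq]
    · rw [if_neg (by push_cast; omega)]
      simp [pvQualB, hq]

theorem pv_condB_iff (cs : List Char) (tc : String) (rl mm ol : Int) (h1 : 1 ≤ rl) (h3 : rl ≤ ol)
    (k : Nat) (hk : (k : Int) ≤ (cs.length : Int) - ol) :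
    pvCondB (pvQS cs tc rl mm) (ol - rl + 1) k = true ↔
      ∃ j : Nat, (j : Int) + rl ≤ ol ∧ pvQualB cs tc rl mm (k + j) = true := by
  have hol : ol ≤ cs.length := by omega
  have hrln : rl ≤ (cs.length : Int) := by omega
  unfold pvCondB
  have hw : (k : Int) + (ol - rl + 1) = ((k + (ol - rl + 1).toNat : Nat) : Int) := by omega
  rw [hw, pv_QS_get cs tc rl mm h1 hrln (k + (ol - rl + 1).toNat) (by push_cast; omega),
    pv_QS_get cs tc rl mm h1 hrln k (by omega)]
  rw [List.range_add, List.countP_append]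
  simp only [decide_eq_true_eq]
  constructor
  · intro h
    have hpos : 0 < List.countP (fun p => pvQualB cs tc rl mm p)
        (List.map (fun x => k + x) (List.range (ol - rl + 1).toNat)) := by omega
    rw [List.countP_map] at hpos
    obtain ⟨j, hj, hq⟩ := List.countP_pos_iff.mp hpos
    rw [List.mem_range] at hj
    exact ⟨j, by omega, hq⟩
  · rintro ⟨j, hjol, hq⟩
    have hpos : 0 < List.countP (fun p => pvQualB cs tc rl mm p)
        (List.map (fun x => k + x) (List.range (ol - rl + 1).toNat)) := by
      rw [List.countP_map]
      exact List.countP_pos_iff.mpr ⟨j, List.mem_range.mpr (by omega), hq⟩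
    omega

theorem pv_condA_iff (cs : List Char) (tc : String) (rl mm ol : Int) (h1 : 1 ≤ rl) (h3 : rl ≤ ol)
    (k : Nat) (hk : (k : Int) ≤ (cs.length : Int) - ol) :
    pvCondA cs tc rl mm ol k = true ↔
      ∃ j : Nat, (j : Int) + rl ≤ ol ∧ pvQualB cs tc rl mm (k + j) = true := by
  unfold pvCondA
  rw [decide_eq_true_eq, pv_maskRuns_sum_pos _ _ _ _ h1]
  have hs : PySem.List.slice cs (some (k : Int)) (some ((k : Int) + ol))
      = (cs.drop k).take ol.toNat := by
    rw [PySem.List.slice_of_nonneg cs (by omega) (by omega) (by omega) (by omega)]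
    congr 1 <;> omega
  rw [hs]
  have hlen : (((cs.drop k).take ol.toNat).length : Int) = ol := by
    simp [List.length_take, List.length_drop]
    omega
  rw [hlen]
  constructor
  · rintro ⟨j, hj, hq⟩
    refine ⟨j, hj, ?_⟩
    unfold pvQualB at hq ⊢
    rw [pv_window cs k ol.toNat j rl.toNat (by omega)] at hq
    exact hq
  · rintro ⟨j, hj, hq⟩
    refine ⟨j, hj, ?_⟩
    unfold pvQualB at hq ⊢
    rw [pv_window cs k ol.toNat j rl.toNat (by omega)]
    exact hq

-- every firing of A's condition yields a qualifying global run start inside the clamped window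
theorem pv_condA_imp (cs : List Char) (tc : String) (rl mm ol : Int) (h1 : 1 ≤ rl) {i : Int}
    (hi : 0 ≤ i) (hc : pvCondA cs tc rl mm ol i = true) :
    ∃ p : Nat, (PySem.List.clampIdx cs.length i : Int) ≤ p ∧
      (p : Int) + rl ≤ (PySem.List.clampIdx cs.length (i + ol) : Int) ∧
      pvQualB cs tc rl mm p = true := by
  unfold pvCondA at hc
  rw [decide_eq_true_eq, pv_maskRuns_sum_pos _ _ _ _ h1] at hc
  obtain ⟨j, hj, hq⟩ := hc
  set a' := PySem.List.clampIdx cs.length i with ha'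
  set b' := PySem.List.clampIdx cs.length (i + ol) with hb'
  have hslice : PySem.List.slice cs (some i) (some (i + ol)) = (cs.drop a').take (b' - a') := rfl
  rw [hslice] at hj hq
  have hlen : ((cs.drop a').take (b' - a')).length = min (b' - a') (cs.length - a') := by
    simp [List.length_take, List.length_drop]
  rw [hlen] at hj
  refine ⟨a' + j, by push_cast; omega, ?_, ?_⟩
  · push_cast
    omega
  · unfold pvQualB at hq ⊢
    rw [pv_window cs a' (b' - a') j rl.toNat (by omega)] at hq
    exact hq

theorem pv_main (inseq tc : String) (rl mm ol : Int) (h1 : 1 ≤ rl) (h2 : 1 ≤ ol) (h3 : rl ≤ ol) :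
    mask_oligos_with_runs inseq tc rl mm ol = mask_oligos_with_runs_alt inseq tc rl mm ol := by
  rw [pv_A_eq, pv_B_eq inseq tc rl mm ol h1 h2 h3]
  rw [pv_pyRange_zero_toNat]
  apply List.ext_getElem?
  intro k
  rw [pv_setfold_getElem?, pv_setfold_getElem?]
  by_cases hk : k < ((inseq.toList.length : Int) - ol + 1).toNat
  · have hkb : (k : Int) ≤ (inseq.toList.length : Int) - ol := by omega
    have hcond : pvCondA inseq.toList tc rl mm ol k = true ↔
        pvCondB (pvQS inseq.toList tc rl mm) (ol - rl + 1) k = true := by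
      rw [pv_condA_iff inseq.toList tc rl mm ol h1 h3 k hkb,
        pv_condB_iff inseq.toList tc rl mm ol h1 h3 k hkb]
    exact if_congr (and_congr_right (fun _ => hcond)) rfl rfl
  · rw [if_neg (by rintro ⟨h, _⟩; omega), if_neg (by rintro ⟨h, _⟩; omega)]

theorem pv_nD_zero (inseq tc : String) (rl mm ol : Int) (h1 : 1 ≤ rl) (h3 : ol < rl)
    (hnd : ¬ D_mask_oligos_with_runs inseq tc rl mm ol) :
    mask_oligos_with_runs inseq tc rl mm ol = List.replicate inseq.toList.length 0 := by
  apply pv_A_zero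
  intro i hi hcond
  rw [PySem.List.mem_pyRange_one] at hi
  obtain ⟨p, hp1, hp2, hp3⟩ := pv_condA_imp inseq.toList tc rl mm ol h1 hi.1 hcond
  set n := inseq.toList.length with hn
  rcases lt_or_ge ol 0 with hol | hol
  · apply hnd
    have hkey : rl ≤ (n : Int) + ol ∧ (p : Int) + rl ≤ (n : Int) - 1 := by
      rcases pv_clampIdx_cases n i with ⟨u1, u2, u3⟩ | ⟨u1, u2, u3⟩ | ⟨u1, u2, u3⟩ | ⟨u1, u2, u3⟩ <;>
        rcases pv_clampIdx_cases n (i + ol) with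
          ⟨v1, v2, v3⟩ | ⟨v1, v2, v3⟩ | ⟨v1, v2, v3⟩ | ⟨v1, v2, v3⟩ <;>
        omega
    refine ⟨hol, h1, hkey.1, p, by omega, ?_⟩
    unfold pvQualB at hp3
    exact of_decide_eq_true hp3
  · rcases pv_clampIdx_cases n i with ⟨u1, u2, u3⟩ | ⟨u1, u2, u3⟩ | ⟨u1, u2, u3⟩ | ⟨u1, u2, u3⟩ <;>
      rcases pv_clampIdx_cases n (i + ol) with
        ⟨v1, v2, v3⟩ | ⟨v1, v2, v3⟩ | ⟨v1, v2, v3⟩ | ⟨v1, v2, v3⟩ <;>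
      omega

-- ===== VERDICT (by name: the statement is the Claim_ definition above) =====
theorem mask_oligos_with_runs_spec : Claim_unchanged_mask_oligos_with_runs := by
  intro inseq tc rl mm ol _ hnd
  by_cases hrl : rl ≤ 0
  · rw [pv_B_zero inseq tc rl mm ol (Or.inl hrl)]
    apply pv_A_zero
    intro i _ hcond
    rw [pvCondA, decide_eq_true_eq] at hcond
    rw [List.sum_eq_zero (pv_maskRuns_zero_elems _ tc rl mm hrl)] at hcond
    exact absurd hcond (lt_irrefl 0)
  · push_neg at hrl
    by_cases holr : ol < rl
    · rw [pv_B_zero inseq tc rl mm ol (Or.inr (Or.inr holr)),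
        pv_nD_zero inseq tc rl mm ol (by omega) holr hnd]
    · push_neg at holr
      exact pv_main inseq tc rl mm ol (by omega) (by omega) holr

theorem mask_oligos_with_runs_changed : Claim_changed_mask_oligos_with_runs := by
  unfold Claim_changed_mask_oligos_with_runs; decide

theorem mask_oligos_with_runs_tight : Claim_exact_mask_oligos_with_runs := by
  intro inseq tc rl mm ol _ hd heq
  obtain ⟨hol, h1, hnl, p, hp, hq⟩ := hd
  have hB := pv_B_zero inseq tc rl mm ol (Or.inr (Or.inr (by omega)))
  rw [hB] at heq
  have hA := pv_A_eq inseq tc rl mm ol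
  rw [pv_pyRange_zero_toNat] at hA
  have hpn : p < inseq.toList.length := by omega
  -- the oligo start A marks: the first i whose wrapped window still reaches run start p
  set i : Nat := ((p : Int) + rl - (inseq.toList.length : Int) - ol).toNat with hidef
  have hip : i ≤ p := by omega
  have hcond : pvCondA inseq.toList tc rl mm ol (i : Int) = true := by
    rw [pvCondA, decide_eq_true_eq, pv_maskRuns_sum_pos _ _ _ _ h1]
    set n := inseq.toList.length with hn
    have ha' : ((PySem.List.clampIdx n (i : Int) : Nat) : Int) = (i : Int) := by
      rcases pv_clampIdx_cases n (i : Int) with ⟨u1, u2, u3⟩ | ⟨u1, u2, u3⟩ | ⟨u1, u2, u3⟩ |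
        ⟨u1, u2, u3⟩ <;> omega
    have hb' : ((PySem.List.clampIdx n ((i : Int) + ol) : Nat) : Int)
        = (n : Int) + (i : Int) + ol := by
      rcases pv_clampIdx_cases n ((i : Int) + ol) with ⟨v1, v2, v3⟩ | ⟨v1, v2, v3⟩ |
        ⟨v1, v2, v3⟩ | ⟨v1, v2, v3⟩ <;> omega
    have hslice : PySem.List.slice inseq.toList (some (i : Int)) (some ((i : Int) + ol))
        = (inseq.toList.drop (PySem.List.clampIdx n (i : Int))).take
            (PySem.List.clampIdx n ((i : Int) + ol) - PySem.List.clampIdx n (i : Int)) := rfl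
    rw [hslice]
    refine ⟨p - i, ?_, ?_⟩
    · simp only [List.length_take, List.length_drop]
      push_cast
      omega
    · rw [pvQualB, pv_window inseq.toList (PySem.List.clampIdx n (i : Int))
        (PySem.List.clampIdx n ((i : Int) + ol) - PySem.List.clampIdx n (i : Int))
        (p - i) rl.toNat (by omega)]
      rw [show PySem.List.clampIdx n (i : Int) + (p - i) = p by omega]
      exact decide_eq_true hq
  have hgi := congrArg (fun l => l[i]?) heq
  simp only at hgi
  rw [hA, pv_setfold_getElem?] at hgi
  rw [if_pos ⟨by omega, hcond⟩, if_pos (by rw [List.length_replicate]; omega)] at hgi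
  rw [List.getElem?_replicate, if_pos (by omega)] at hgi
  exact absurd hgi (by decide)
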